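-- pv_equiv track=rewrite | github.com/thisiskennyb/code_challenges | string_to_camelcase/main.py | str_to_camel
-- ===== SOURCE A (Python) =====
-- def str_to_camel(s):
--     str_list = []
--
--     for i in range(len(s)):
--         if s[i].isalpha():
--             str_list.append(s[i])
--         else:
--             str_list.append(" ")
--
--     for j in range(len(str_list)):
--         if j > 0 and str_list[j-1] == " ":
--             str_list[j] = str_list[j].upper()
--
--     first_str = "".join(str_list)
--     no_space = first_str.split(" ")
--     return "".join(no_space)
-- ===== SOURCE B (Python) =====
-- def str_to_camel(s):
--     out = []
--     cap = False
--     for c in s: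
--         if c.isalpha():
--             out.append(c.upper() if cap else c)
--             cap = False
--         else:
--             cap = True
--     return "".join(out)
-- ===== Notes on version B (the rewrite author's own statement) =====
-- stated objective: simpler
-- what changed: A builds a mutable char list in three passes (mask non-letters to spaces, uppercase after spaces via index mutation, then split/join to delete spaces); B is a single left-to-right pass carrying a capitalize-next flag and appending only letters.
import Mathlib
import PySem

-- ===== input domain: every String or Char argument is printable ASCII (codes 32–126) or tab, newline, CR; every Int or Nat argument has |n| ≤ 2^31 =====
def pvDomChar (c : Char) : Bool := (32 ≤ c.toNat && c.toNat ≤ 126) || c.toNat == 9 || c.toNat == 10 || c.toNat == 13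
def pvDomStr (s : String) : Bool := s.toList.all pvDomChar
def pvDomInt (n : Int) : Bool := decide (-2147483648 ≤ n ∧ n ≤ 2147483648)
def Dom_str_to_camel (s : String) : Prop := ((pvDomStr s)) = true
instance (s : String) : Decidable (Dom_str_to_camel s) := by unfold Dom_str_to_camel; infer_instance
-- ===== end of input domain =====

-- B replaces A's three passes (mask non-letters to spaces, uppercase-after-space by index
-- mutation, split/join to drop spaces) with one pass carrying a capitalize-next flag; same
-- return value, objective: simpler.

-- ===== PORT A =====
-- Python builds a list of one-character strings; ported as a List Char (exact: every element
-- is a single character, and "".join of one-character strings is String.ofList of those chars).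
def str_to_camel (s : String) : String :=
  let cs := s.toList
  -- for i in range(len(s)): str_list.append(s[i] if s[i].isalpha() else " ")
  let str_list : List Char :=
    (PySem.List.pyRange 0 (PySem.Chars.len cs) 1).foldl
      (fun acc i =>
        acc ++ [if PySem.Chars.isalpha (PySem.List.pyGetD cs i ' ') then
                  PySem.List.pyGetD cs i ' ' else ' ']) []
  -- for j in range(len(str_list)): if j > 0 and str_list[j-1] == " ": str_list[j] = str_list[j].upper()
  let str_list2 : List Char :=
    (PySem.List.pyRange 0 (PySem.Chars.len str_list) 1).foldl
      (fun acc j =>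
        if 0 < j ∧ PySem.List.pyGetD acc (j - 1) ' ' = ' ' then
          acc.set j.toNat (PySem.Chars.upperChar (PySem.List.pyGetD acc j ' '))
        else acc) str_list
  -- first_str = "".join(str_list); no_space = first_str.split(" "); return "".join(no_space)
  let no_space := PySem.Chars.splitOn str_list2 [' ']
  String.ofList (PySem.Chars.join [] no_space)

-- ===== PORT B =====
def str_to_camel_alt (s : String) : String :=
  let r := s.toList.foldl
    (fun (st : List Char × Bool) c =>
      if PySem.Chars.isalpha c then
        (st.1 ++ [if st.2 then PySem.Chars.upperChar c else c], false)
      else (st.1, true)) ([], false)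
  String.ofList r.1

-- ===== PRECONDITION & SPEC =====
def Spec_str_to_camel (s : String) (out : String) : Prop := out = str_to_camel_alt s
instance (s : String) (out : String) : Decidable (Spec_str_to_camel s out) := by unfold Spec_str_to_camel; infer_instance

-- ===== CLAIM (what is proved, stated in full; the proofs are below) =====
def Claim_equal_str_to_camel : Prop := ∀ (s : String), Dom_str_to_camel s → Spec_str_to_camel s (str_to_camel s)

-- ===== LEMMAS AND PROOFS =====

-- The masking A's first loop applies to each character.
def pvMask (c : Char) : Char := if PySem.Chars.isalpha c then c else ' '

-- The in-place semantics of A's second loop: a character is uppercased when the (already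
-- processed) previous character is a space; the new character is passed along as `prev`.
def pvMark (prev : Char) : List Char → List Char
  | [] => []
  | c :: rest =>
    let c' := if prev = ' ' then PySem.Chars.upperChar c else c
    c' :: pvMark c' rest

theorem pvUpperChar_ne_space {c : Char} (h : c ≠ ' ') : PySem.Chars.upperChar c ≠ ' ' := by
  unfold PySem.Chars.upperChar PySem.Chars.islower
  split
  · rename_i hl
    simp only [Bool.and_eq_true, decide_eq_true_eq] at hl
    have h1 : 97 ≤ c.toNat := by
      have := hl.1
      simp only [Char.le_def, UInt32.le_iff_toNat_le] at this
      exact this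
    have h2 : c.toNat ≤ 122 := by
      have := hl.2
      simp only [Char.le_def, UInt32.le_iff_toNat_le] at this
      exact this
    intro hcon
    have := congrArg Char.toNat hcon
    rw [Char.toNat_ofNat] at this
    rw [if_pos (Or.inl (by omega))] at this
    rw [show (' ' : Char).toNat = 32 from rfl] at this
    omega
  · exact h

-- A's first loop is a map of pvMask.
theorem pvStep1 (cs : List Char) :
    (PySem.List.pyRange 0 (PySem.Chars.len cs) 1).foldl
      (fun acc i =>
        acc ++ [if PySem.Chars.isalpha (PySem.List.pyGetD cs i ' ') then
                  PySem.List.pyGetD cs i ' ' else ' ']) []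
    = cs.map pvMask := by
  rw [show PySem.Chars.len cs = (cs.length : Int) from PySem.Chars.len_eq cs]
  rw [PySem.List.foldl_pyRange_zero_pyGetD' cs ' '
       (fun acc c => acc ++ [if PySem.Chars.isalpha c then c else ' ']) []]
  rw [PySem.List.foldl_append_singleton_eq_map]
  rfl

-- Invariant of A's second (mutating) loop: with the first `pre.length` cells already
-- processed, the loop rewrites the suffix as pvMark driven by the last processed cell.
theorem pvStep2_inv (suf : List Char) : ∀ (pre : List Char) (hpre : pre ≠ []),
    (PySem.List.pyRange (pre.length : Int) ((pre.length : Int) + suf.length) 1).foldl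
      (fun acc j =>
        if 0 < j ∧ PySem.List.pyGetD acc (j - 1) ' ' = ' ' then
          acc.set j.toNat (PySem.Chars.upperChar (PySem.List.pyGetD acc j ' '))
        else acc) (pre ++ suf)
    = pre ++ pvMark (pre.getLast hpre) suf := by
  induction suf with
  | nil =>
    intro pre hpre
    simp [PySem.List.pyRange_one_eq_nil, pvMark]
  | cons c rest ih =>
    intro pre hpre
    have hlen : (0:Int) < pre.length := by
      have := List.length_pos_iff.mpr hpre; exact_mod_cast this
    rw [PySem.List.pyRange_one_cons (by simp [List.length_cons])]
    rw [List.foldl_cons]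
    have hget1 : PySem.List.pyGetD (pre ++ c :: rest) ((pre.length : Int) - 1) ' '
        = pre.getLast hpre := by
      rw [show ((pre.length : Int) - 1) = ((pre.length - 1 : Nat) : Int) by omega]
      rw [PySem.List.pyGetD_natCast]
      rw [List.getD_eq_getElem?_getD, List.getElem?_append_left (by omega)]
      rw [List.getLast_eq_getElem, List.getElem?_eq_getElem (by omega)]
      rfl
    have hget2 : PySem.List.pyGetD (pre ++ c :: rest) ((pre.length : Int)) ' ' = c := by
      rw [PySem.List.pyGetD_natCast]
      rw [List.getD_eq_getElem?_getD, List.getElem?_append_right (by omega)]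
      simp
    have hset : ∀ c', (pre ++ c :: rest).set ((pre.length : Int)).toNat c' = (pre ++ [c']) ++ rest := by
      intro c'
      rw [Int.toNat_natCast, List.set_append_right _ _ (by omega)]
      simp
    by_cases hsp : pre.getLast hpre = ' '
    · rw [if_pos ⟨hlen, by rw [hget1]; exact hsp⟩, hget2, hset]
      have harr : ((pre.length : Int) + ((c :: rest).length : Int)) = (((pre ++ [PySem.Chars.upperChar c]).length : Int) + (rest.length : Int)) := by
        simp; omega
      rw [show ((pre.length : Int) + 1) = (((pre ++ [PySem.Chars.upperChar c]).length : Int)) by simp]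
      rw [harr]
      rw [ih (pre ++ [PySem.Chars.upperChar c]) (by simp)]
      simp [pvMark, hsp]
    · rw [if_neg (by rw [hget1]; tauto)]
      have harr : ((pre.length : Int) + ((c :: rest).length : Int)) = (((pre ++ [c]).length : Int) + (rest.length : Int)) := by
        simp; omega
      rw [show ((pre.length : Int) + 1) = (((pre ++ [c]).length : Int)) by simp]
      have : pre ++ c :: rest = (pre ++ [c]) ++ rest := by simp
      rw [this, harr, ih (pre ++ [c]) (by simp)]
      simp [pvMark, hsp]

theorem pvStep2 (l : List Char) :
    (PySem.List.pyRange 0 (PySem.Chars.len l) 1).foldl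
      (fun acc j =>
        if 0 < j ∧ PySem.List.pyGetD acc (j - 1) ' ' = ' ' then
          acc.set j.toNat (PySem.Chars.upperChar (PySem.List.pyGetD acc j ' '))
        else acc) l
    = pvMark 'x' l := by
  cases l with
  | nil => simp [PySem.List.pyRange_one_eq_nil, pvMark]
  | cons c t =>
    rw [show PySem.Chars.len (c :: t) = ((c :: t).length : Int) from PySem.Chars.len_eq _]
    rw [PySem.List.pyRange_one_cons (by simp [List.length_cons])]
    rw [List.foldl_cons, if_neg (by simp)]
    have h0 : (0 : Int) + 1 = (([c].length : Int)) := by simp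
    have h1 : ((c :: t).length : Int) = (([c].length : Int) + (t.length : Int)) := by
      simp [List.length_cons]; omega
    rw [h0, h1, show (c :: t) = [c] ++ t from rfl, pvStep2_inv t [c] (by simp)]
    simp [pvMark, List.getLast]

-- "".join(l.split(" ")) deletes exactly the spaces.
theorem pvJoinNilFlatten (ps : List (List Char)) : PySem.Chars.join [] ps = ps.flatten := by
  induction ps with
  | nil => rfl
  | cons p ps ih => simp [PySem.Chars.join, List.intercalate] at *; cases ps <;> simp_all

theorem pvGoJoin : ∀ (fuel : Nat) (l cur : List Char) (acc : List (List Char)), l.length ≤ fuel →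
    PySem.Chars.join [] (PySem.Chars.splitOn.go [' '] fuel l cur acc)
    = (acc.reverse.flatten) ++ cur.reverse ++ l.filter (· ≠ ' ') := by
  intro fuel
  induction fuel with
  | zero =>
    intro l cur acc h
    have : l = [] := List.eq_nil_of_length_eq_zero (Nat.le_zero.mp h)
    subst this
    simp [PySem.Chars.splitOn.go, pvJoinNilFlatten]
  | succ n ih =>
    intro l cur acc h
    cases l with
    | nil => simp [PySem.Chars.splitOn.go, pvJoinNilFlatten]
    | cons c rest =>
      simp only [PySem.Chars.splitOn.go]
      by_cases hc : c = ' '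
      · subst hc
        rw [if_pos (by simp [List.isPrefixOf])]
        rw [ih _ _ _ (by simpa using Nat.le_of_succ_le_succ h)]
        simp
      · rw [if_neg (by simp [List.isPrefixOf]; exact fun hh => hc hh.symm)]
        rw [ih _ _ _ (by simpa using Nat.le_of_succ_le_succ h)]
        simp [hc]

theorem pvJoinSplit (l : List Char) :
    PySem.Chars.join [] (PySem.Chars.splitOn l [' ']) = l.filter (· ≠ ' ') := by
  unfold PySem.Chars.splitOn
  rw [pvGoJoin _ _ _ _ (by omega)]
  simp

-- B's single pass computes mask-mark-filter; the flag means "previous marked char is a space".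
theorem pvB_inv (cs : List Char) : ∀ (acc : List Char) (b : Bool) (prev : Char),
    b = decide (prev = ' ') →
    (cs.foldl
      (fun (st : List Char × Bool) c =>
        if PySem.Chars.isalpha c then
          (st.1 ++ [if st.2 then PySem.Chars.upperChar c else c], false)
        else (st.1, true)) (acc, b)).1
    = acc ++ (pvMark prev (cs.map pvMask)).filter (· ≠ ' ') := by
  induction cs with
  | nil => intro acc b prev _; simp [pvMark]
  | cons c rest ih =>
    intro acc b prev hb
    subst hb
    simp only [List.map_cons, List.foldl_cons]
    by_cases ha : PySem.Chars.isalpha c = true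
    · have hcs : c ≠ ' ' := by
        intro hc; subst hc
        simp [PySem.Chars.isalpha, PySem.Chars.isupper, PySem.Chars.islower] at ha
      rw [if_pos ha]
      by_cases hp : prev = ' '
      · have hc' : PySem.Chars.upperChar c ≠ ' ' := pvUpperChar_ne_space hcs
        rw [ih _ false (PySem.Chars.upperChar c) (by simp [hc'])]
        simp [pvMark, pvMask, ha, hp, hc']
      · rw [ih _ false c (by simp [hcs])]
        simp [pvMark, pvMask, ha, hp, hcs]
    · rw [if_neg ha]
      have hs : (if prev = ' ' then PySem.Chars.upperChar ' ' else ' ') = ' ' := by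
        split <;> rfl
      rw [ih _ true ' ' (by simp)]
      simp [pvMark, pvMask, ha, hs]

-- ===== VERDICT (by name: the statement is the Claim_ definition above) =====
theorem str_to_camel_spec : Claim_equal_str_to_camel := by
  intro s _
  simp only [Spec_str_to_camel, str_to_camel, str_to_camel_alt]
  rw [pvStep1, pvStep2, pvJoinSplit]
  rw [pvB_inv s.toList [] false 'x' (by simp)]
  simp
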